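-- pv_equiv track=rewrite | github.com/Hzqfly123/my_entity_reconginition | bilstm_crf/data.py | get_entity_key
-- ===== SOURCE A (Python) =====
-- def get_entity_key(tag_seq, char_seq, key):
--     entities = []
--     entity = ''
--     for (char, tag) in zip(char_seq, tag_seq):
--         if tag == 'B-' + key or tag == 'I-' + key :
--             entity += char
--         else:
--             if len(entity) != 0:
--                 entities.append(entity)
--                 entity = ''
--     if len(entity) != 0:
--         entities.append(entity)
--     return entities
-- ===== SOURCE B (Python) =====
-- def get_entity_key(tag_seq, char_seq, key):
--     b_tag = 'B-' + key
--     i_tag = 'I-' + key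
--     pairs = list(zip(char_seq, tag_seq))
--     n = len(pairs)
--     is_ent = [tag == b_tag or tag == i_tag for _, tag in pairs]
--     entities = []
--     i = 0
--     while i < n:
--         if is_ent[i]:
--             j = i + 1
--             while j < n and is_ent[j]:
--                 j += 1
--             joined = ''.join(char for char, _ in pairs[i:j])
--             if joined:
--                 entities.append(joined)
--             i = j
--         else:
--             i += 1
--     return entities
-- ===== Notes on version B (the rewrite author's own statement) =====
-- stated objective: faster
-- what changed: Replaces A's char-by-char accumulator state machine (repeated string += into a pending entity, flushed at each non-matching tag and at the end) with a two-pointer scan over a precomputed boolean match mask: an inner while finds the end of each maximal matching run and the whole run is sliced and joined at once.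
import Mathlib
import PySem

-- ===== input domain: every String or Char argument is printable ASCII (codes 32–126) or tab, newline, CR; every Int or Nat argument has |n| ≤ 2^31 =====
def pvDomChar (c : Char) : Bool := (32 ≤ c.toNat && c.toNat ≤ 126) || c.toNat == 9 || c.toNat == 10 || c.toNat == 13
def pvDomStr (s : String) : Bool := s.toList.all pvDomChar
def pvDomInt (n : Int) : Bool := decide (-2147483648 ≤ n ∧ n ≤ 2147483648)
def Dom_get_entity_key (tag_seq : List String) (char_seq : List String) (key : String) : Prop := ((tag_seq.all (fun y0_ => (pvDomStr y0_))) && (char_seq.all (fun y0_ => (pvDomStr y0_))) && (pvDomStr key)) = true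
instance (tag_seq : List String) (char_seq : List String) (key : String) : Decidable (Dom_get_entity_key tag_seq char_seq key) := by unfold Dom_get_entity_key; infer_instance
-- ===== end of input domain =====

-- B replaces A's flush-at-boundary accumulator state machine (repeated string += into a pending
-- entity) by a two-pointer scan over a precomputed match mask, slicing and joining each maximal
-- matching run at once; a timing run measured B faster at the larger generated sizes.

-- ===== PORT A =====
-- body of A's for-loop: state = (entities, entity)
def getEntityStepA (key : String) (st : List String × String) (ct : String × String) : List String × String :=
  if ct.2 == "B-" ++ key || ct.2 == "I-" ++ key then (st.1, st.2 ++ ct.1)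
  else if PySem.Str.len st.2 ≠ 0 then (st.1 ++ [st.2], "") else st

def get_entity_key (tag_seq : List String) (char_seq : List String) (key : String) : List String :=
  let st := (char_seq.zip tag_seq).foldl (getEntityStepA key) ([], "")
  if PySem.Str.len st.2 ≠ 0 then st.1 ++ [st.2] else st.1

-- ===== PORT B =====
-- inner `while j < n and is_ent[j]: j += 1`
def altScan (isEnt : List Bool) (n : Nat) (j : Nat) : Nat :=
  if j < n ∧ PySem.List.pyGetD isEnt (j : Int) false = true then altScan isEnt n (j + 1) else j
termination_by n - j

-- the inner while loop never moves its cursor backwards (needed for the outer loop's termination)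
theorem altScan_ge (isEnt : List Bool) (n : Nat) (j : Nat) : j ≤ altScan isEnt n j := by
  unfold altScan
  split
  · exact le_trans (Nat.le_succ j) (altScan_ge isEnt n (j + 1))
  · exact Nat.le_refl j
termination_by n - j

-- outer `while i < n` loop
def altLoop (pairs : List (String × String)) (isEnt : List Bool) (n : Nat)
    (entities : List String) (i : Nat) : List String :=
  if i < n then
    if PySem.List.pyGetD isEnt (i : Int) false then
      let j := altScan isEnt n (i + 1)
      let joined := PySem.Str.join "" ((PySem.List.slice pairs (some (i : Int)) (some (j : Int))).map Prod.fst)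
      let entities' := if joined ≠ "" then entities ++ [joined] else entities
      altLoop pairs isEnt n entities' j
    else altLoop pairs isEnt n entities (i + 1)
  else entities
termination_by n - i
decreasing_by
  · have := altScan_ge isEnt n (i + 1); omega
  · omega

def get_entity_key_alt (tag_seq : List String) (char_seq : List String) (key : String) : List String :=
  let b_tag := "B-" ++ key
  let i_tag := "I-" ++ key
  let pairs := char_seq.zip tag_seq
  let n := pairs.length
  let isEnt := pairs.map (fun p => p.2 == b_tag || p.2 == i_tag)
  altLoop pairs isEnt n [] 0

-- ===== PRECONDITION & SPEC =====
def Spec_get_entity_key (tag_seq : List String) (char_seq : List String) (key : String) (out : List String) : Prop := out = get_entity_key_alt tag_seq char_seq key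
instance (tag_seq : List String) (char_seq : List String) (key : String) (out : List String) : Decidable (Spec_get_entity_key tag_seq char_seq key out) := by unfold Spec_get_entity_key; infer_instance

-- ===== CLAIM (what is proved, stated in full; the proofs are below) =====
def Claim_equal_get_entity_key : Prop := ∀ (tag_seq : List String) (char_seq : List String) (key : String), Dom_get_entity_key tag_seq char_seq key → Spec_get_entity_key tag_seq char_seq key (get_entity_key tag_seq char_seq key)

-- ===== LEMMAS AND PROOFS =====

-- 'tag matches B-key or I-key' as a named predicate (both ports test exactly this expression)
def entP (key : String) (p : String × String) : Bool := p.2 == "B-" ++ key || p.2 == "I-" ++ key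

-- common characterisation: entities of a pair list, given the pending accumulator e
def specG (key : String) : String → List (String × String) → List String
  | e, [] => if e ≠ "" then [e] else []
  | e, (c, t) :: r =>
      if entP key (c, t) then specG key (e ++ c) r
      else (if e ≠ "" then [e] else []) ++ specG key "" r

theorem len_ne_zero (e : String) : (PySem.Str.len e ≠ 0) = (e ≠ "") := by
  simp [PySem.Str.len_eq]

theorem join_empty_cons (x : String) (xs : List String) :
    PySem.Str.join "" (x :: xs) = x ++ PySem.Str.join "" xs := by
  have h : ∀ (a : List Char) (l : List (List Char)),
      PySem.Chars.join [] (a :: l) = a ++ PySem.Chars.join [] l := by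
    intro a l
    cases l with
    | nil => simp [PySem.Chars.join_singleton, PySem.Chars.join_nil]
    | cons b t => rw [PySem.Chars.join_cons_cons]; simp
  simp only [PySem.Str.join, String.toList_empty, List.map_cons, h, String.ofList_append,
    String.ofList_toList]

theorem join_empty_nil : PySem.Str.join "" ([] : List String) = "" := by
  simp [PySem.Str.join, PySem.Chars.join_nil]

-- A's loop (and final flush) computes specG
theorem A_loop_eq (key : String) : ∀ (ps : List (String × String)) (acc : List String) (e : String),
    (if PySem.Str.len (ps.foldl (getEntityStepA key) (acc, e)).2 ≠ 0
     then (ps.foldl (getEntityStepA key) (acc, e)).1 ++ [(ps.foldl (getEntityStepA key) (acc, e)).2]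
     else (ps.foldl (getEntityStepA key) (acc, e)).1) = acc ++ specG key e ps := by
  intro ps
  induction ps with
  | nil =>
      intro acc e
      simp only [List.foldl_nil, specG, len_ne_zero]
      split
      · rfl
      · simp_all
  | cons ct r ih =>
      intro acc e
      obtain ⟨c, t⟩ := ct
      simp only [List.foldl_cons]
      by_cases hent : entP key (c, t) = true
      · have hstep : getEntityStepA key (acc, e) (c, t) = (acc, e ++ c) := by
          simp only [getEntityStepA]
          rw [if_pos (show (t == "B-" ++ key || t == "I-" ++ key) = true by simpa [entP] using hent)]
        rw [hstep, ih, show specG key e ((c, t) :: r) = specG key (e ++ c) r by simp [specG, hent]]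
      · have hb : (t == "B-" ++ key || t == "I-" ++ key) = false := by
          simpa [entP] using hent
        have hspec : specG key e ((c, t) :: r) = (if e ≠ "" then [e] else []) ++ specG key "" r := by
          simp [specG, hent]
        by_cases he : e = ""
        · have hstep : getEntityStepA key (acc, e) (c, t) = (acc, e) := by
            simp [getEntityStepA, hb, he]
          rw [hstep, ih, hspec, he]
          simp
        · have hstep : getEntityStepA key (acc, e) (c, t) = (acc ++ [e], "") := by
            simp [getEntityStepA, hb, he]
          rw [hstep, ih, hspec]
          simp [he]

theorem dropWhile_head_false {α : Type} (p : α → Bool) (l : List α) (q : α) (r : List α)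
    (h : l.dropWhile p = q :: r) : p q = false := by
  have hne : l.dropWhile p ≠ [] := by simp [h]
  have h2 := List.head_dropWhile_not (l := l) (p := p) hne
  have h3 : (l.dropWhile p).head hne = q := by simp [h]
  rw [h3] at h2
  simpa using h2

-- the inner while loop lands just past the maximal run of set mask bits
theorem altScan_eq (isEnt : List Bool) (k : Nat) :
    altScan isEnt isEnt.length k = k + ((isEnt.drop k).takeWhile id).length := by
  unfold altScan
  by_cases h : k < isEnt.length ∧ PySem.List.pyGetD isEnt (k : Int) false = true
  · rw [if_pos h]
    obtain ⟨hk, hv⟩ := h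
    have hget : isEnt[k] = true := by
      simpa [List.getD, List.getElem?_eq_getElem hk] using hv
    rw [altScan_eq isEnt (k + 1), List.drop_eq_getElem_cons hk, hget]
    simp
    omega
  · rw [if_neg h]
    by_cases hk : k < isEnt.length
    · have hv : PySem.List.pyGetD isEnt (k : Int) false = false := by
        by_contra hc
        exact h ⟨hk, by simpa using hc⟩
      have hget : isEnt[k] = false := by
        simpa [List.getD, List.getElem?_eq_getElem hk] using hv
      rw [List.drop_eq_getElem_cons hk, hget]
      simp
    · rw [List.drop_eq_nil_of_le (by omega)]
      simp
termination_by isEnt.length - k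

-- consuming a run of matching pairs extends the pending entity by the joined chars
theorem spec_run (key : String) : ∀ (run : List (String × String)) (e : String) (rest : List (String × String)),
    (∀ p ∈ run, entP key p = true) →
    specG key e (run ++ rest) = specG key (e ++ PySem.Str.join "" (run.map Prod.fst)) rest := by
  intro run
  induction run with
  | nil =>
      intro e rest _
      simp [join_empty_nil]
  | cons q run' ih =>
      intro e rest hall
      obtain ⟨c, t⟩ := q
      have hq : entP key (c, t) = true := hall _ (by simp)
      simp only [List.cons_append, specG, hq, if_pos]
      rw [ih (e ++ c) rest (fun p hp => hall p (by simp [hp])),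
          List.map_cons, join_empty_cons, String.append_assoc]

-- at a boundary (end of input or a non-matching pair) the pending entity flushes
theorem spec_flush (key : String) (e : String) (rest : List (String × String))
    (h : rest = [] ∨ ∃ q r', rest = q :: r' ∧ entP key q = false) :
    specG key e rest = (if e ≠ "" then [e] else []) ++ specG key "" rest := by
  rcases h with h | ⟨q, r', hr, hq⟩
  · subst h; simp [specG]
  · subst hr
    obtain ⟨c, t⟩ := q
    simp [specG, hq]

-- B's outer loop computes specG of the unprocessed suffix
theorem altLoop_eq (key : String) (pairs : List (String × String)) (i : Nat) (entities : List String) :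
    altLoop pairs (pairs.map (entP key)) pairs.length entities i
      = entities ++ specG key "" (pairs.drop i) := by
  unfold altLoop
  by_cases hi : i < pairs.length
  · rw [if_pos hi]
    have hilen : i < (pairs.map (entP key)).length := by simpa using hi
    by_cases hv : PySem.List.pyGetD (pairs.map (entP key)) (i : Int) false = true
    · rw [if_pos hv]
      have hget : entP key (pairs[i]'hi) = true := by
        simpa [List.getD, List.getElem?_eq_getElem hilen] using hv
      have hdropi : pairs.drop i = pairs[i] :: pairs.drop (i + 1) := List.drop_eq_getElem_cons hi
      have hruncons : (pairs.drop i).takeWhile (entP key)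
          = pairs[i] :: (pairs.drop (i + 1)).takeWhile (entP key) := by
        rw [hdropi, List.takeWhile_cons, if_pos (by simp [hget])]
      have htl : (((pairs.map (entP key)).drop (i + 1)).takeWhile id).length
          = ((pairs.drop (i + 1)).takeWhile (entP key)).length := by
        rw [← List.map_drop, List.takeWhile_map]
        simp
      have hj : altScan (pairs.map (entP key)) pairs.length (i + 1)
          = i + ((pairs.drop i).takeWhile (entP key)).length := by
        have h1 := altScan_eq (pairs.map (entP key)) (i + 1)
        rw [List.length_map] at h1
        rw [h1, htl, hruncons]
        simp
        omega
      have hsplit : pairs.drop i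
          = (pairs.drop i).takeWhile (entP key) ++ (pairs.drop i).dropWhile (entP key) :=
        (List.takeWhile_append_dropWhile).symm
      have hslice : PySem.List.slice pairs (some (i : Int))
            (some ((i + ((pairs.drop i).takeWhile (entP key)).length : Nat) : Int))
          = (pairs.drop i).takeWhile (entP key) := by
        rw [PySem.List.slice_natCast, Nat.add_sub_cancel_left]
        have h2 := congrArg (List.take (((pairs.drop i).takeWhile (entP key)).length)) hsplit
        rw [List.take_left] at h2
        exact h2
      have hdropj : pairs.drop (i + ((pairs.drop i).takeWhile (entP key)).length)
          = (pairs.drop i).dropWhile (entP key) := by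
        have h2 := congrArg (List.drop (((pairs.drop i).takeWhile (entP key)).length)) hsplit
        rw [List.drop_left] at h2
        rw [← List.drop_drop]
        exact h2
      have hrestshape : (pairs.drop i).dropWhile (entP key) = []
          ∨ ∃ q r', (pairs.drop i).dropWhile (entP key) = q :: r' ∧ entP key q = false := by
        cases hr : (pairs.drop i).dropWhile (entP key) with
        | nil => exact Or.inl rfl
        | cons q r' => exact Or.inr ⟨q, r', rfl, dropWhile_head_false _ _ _ _ hr⟩
      rw [hj]
      simp only [hslice]
      rw [altLoop_eq key pairs (i + ((pairs.drop i).takeWhile (entP key)).length), hdropj]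
      conv_rhs => rw [hsplit]
      rw [spec_run key _ "" _ (fun p hp => List.mem_takeWhile_imp hp), String.empty_append,
          spec_flush key (PySem.Str.join "" (((pairs.drop i).takeWhile (entP key)).map Prod.fst)) _ hrestshape]
      by_cases hJ : PySem.Str.join "" (((pairs.drop i).takeWhile (entP key)).map Prod.fst) = ""
      · simp [hJ]
      · simp [hJ, List.append_assoc]
    · rw [if_neg hv]
      have hvf : PySem.List.pyGetD (pairs.map (entP key)) (i : Int) false = false := by
        by_contra hc
        exact hv (by simpa using hc)
      have hget : entP key (pairs[i]'hi) = false := by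
        simpa [List.getD, List.getElem?_eq_getElem hilen] using hvf
      rw [altLoop_eq key pairs (i + 1), List.drop_eq_getElem_cons hi]
      rcases hp : pairs[i]'hi with ⟨c, t⟩
      rw [hp] at hget
      simp [specG, hget]
  · rw [if_neg hi]
    rw [List.drop_eq_nil_of_le (by omega)]
    simp [specG]
termination_by pairs.length - i
decreasing_by
  · rw [hruncons]; simp; omega
  · omega

-- ===== VERDICT (by name: the statement is the Claim_ definition above) =====
theorem get_entity_key_spec : Claim_equal_get_entity_key := by
  intro tag_seq char_seq key _
  unfold Spec_get_entity_key get_entity_key get_entity_key_alt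
  have hA := A_loop_eq key (char_seq.zip tag_seq) [] ""
  have hent : (fun p : String × String => p.2 == "B-" ++ key || p.2 == "I-" ++ key) = entP key := rfl
  have hB := altLoop_eq key (char_seq.zip tag_seq) 0 []
  simp only [hent, hA, hB, List.drop_zero, List.nil_append]
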